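-- pv_equiv track=rewrite | github.com/PramodCodes/Job-description-scrapper | IN-Naukri/scraper_utils.py | extract_placeholder_info
-- ===== SOURCE A (Python) =====
-- def extract_placeholder_info(placeholders: list) -> tuple[str, str, str]:
--     """Extracts experience, salary, and location from the placeholders list."""
--     exp = "Not Specified"
--     salary = "Not Specified"
--     location = "Not Specified"
--     if not isinstance(placeholders, list): # Add safety check
--         return exp, salary, location
--     for item in placeholders:
--         if not isinstance(item, dict): continue # Safety check
--         item_type = item.get('type')
--         label = item.get('label')
--         if label: # Only update if label is not empty/None
--             if item_type == 'experience':
--                 exp = label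
--             elif item_type == 'salary':
--                 salary = label
--             elif item_type == 'location':
--                  location = label
--     return exp, salary, location
-- ===== SOURCE B (Python) =====
-- def extract_placeholder_info(placeholders: list) -> tuple[str, str, str]:
--     """Extracts experience, salary, and location from the placeholders list."""
--     if not isinstance(placeholders, list):
--         return "Not Specified", "Not Specified", "Not Specified"
--
--     def last_label(wanted_type):
--         # Scan backwards; the first match found is A's forward last-wins value.
--         for item in reversed(placeholders):
--             if isinstance(item, dict) and item.get('type') == wanted_type:
--                 label = item.get('label')
--                 if label:
--                     return label
--         return "Not Specified"
--
--     return last_label('experience'), last_label('salary'), last_label('location')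
-- ===== Notes on version B (the rewrite author's own statement) =====
-- stated objective: alternative
-- what changed: Replaces the single forward pass with three mutating accumulators by three independent backward searches with early exit: for each of the three types, scan the list in reverse and return the first truthy label of that type (which equals the forward last-wins value).
import Mathlib
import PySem

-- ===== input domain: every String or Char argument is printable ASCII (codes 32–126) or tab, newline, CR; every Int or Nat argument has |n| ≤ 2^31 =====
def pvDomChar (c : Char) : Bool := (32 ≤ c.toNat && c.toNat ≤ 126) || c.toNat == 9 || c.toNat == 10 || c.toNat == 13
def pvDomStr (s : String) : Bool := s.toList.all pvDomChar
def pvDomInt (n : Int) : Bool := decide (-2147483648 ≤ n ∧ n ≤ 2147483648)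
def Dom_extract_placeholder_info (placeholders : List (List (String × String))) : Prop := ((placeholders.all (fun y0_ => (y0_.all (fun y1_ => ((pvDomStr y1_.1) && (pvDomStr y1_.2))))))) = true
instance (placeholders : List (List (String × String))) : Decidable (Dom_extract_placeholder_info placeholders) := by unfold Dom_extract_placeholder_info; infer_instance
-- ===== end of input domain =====

-- B replaces A's single forward pass with three mutating accumulators by three independent
-- backward searches with early exit (alternative decomposition); return value proved equal.

-- ===== PORT A =====
-- A's loop body: read type and label; if the label is truthy, update the matching
-- accumulator of the three (if/elif chain, same order as A).
def pvStepA (st : String × String × String) (item : List (String × String)) :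
    String × String × String :=
  let d := PySem.Dict.ofList item
  let item_type := d.get? "type"
  match d.get? "label" with
  | none => st
  | some label =>
    if label ≠ "" then
      if item_type = some "experience" then (label, st.2.1, st.2.2)
      else if item_type = some "salary" then (st.1, label, st.2.2)
      else if item_type = some "location" then (st.1, st.2.1, label)
      else st
    else st

def extract_placeholder_info (placeholders : List (List (String × String))) :
    String × String × String :=
  placeholders.foldl pvStepA ("Not Specified", "Not Specified", "Not Specified")

-- ===== PORT B =====
-- B's helper last_label: scan the (already reversed) list, return the first truthy
-- label whose item type equals the wanted type; default "Not Specified".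
def pvLastLabel (wanted_type : String) : List (List (String × String)) → String
  | [] => "Not Specified"
  | item :: rest =>
    let d := PySem.Dict.ofList item
    if d.get? "type" = some wanted_type then
      match d.get? "label" with
      | some label => if label ≠ "" then label else pvLastLabel wanted_type rest
      | none => pvLastLabel wanted_type rest
    else pvLastLabel wanted_type rest

def extract_placeholder_info_alt (placeholders : List (List (String × String))) :
    String × String × String :=
  (pvLastLabel "experience" placeholders.reverse,
   pvLastLabel "salary" placeholders.reverse,
   pvLastLabel "location" placeholders.reverse)

-- ===== PRECONDITION & SPEC =====
def Spec_extract_placeholder_info (placeholders : List (List (String × String))) (out : String × String × String) : Prop := out = extract_placeholder_info_alt placeholders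
instance (placeholders : List (List (String × String))) (out : String × String × String) : Decidable (Spec_extract_placeholder_info placeholders out) := by unfold Spec_extract_placeholder_info; infer_instance

-- ===== CLAIM (what is proved, stated in full; the proofs are below) =====
def Claim_equal_extract_placeholder_info : Prop := ∀ (placeholders : List (List (String × String))), Dom_extract_placeholder_info placeholders → Spec_extract_placeholder_info placeholders (extract_placeholder_info placeholders)

-- ===== LEMMAS AND PROOFS =====

theorem pvLastLabel_cons (t : String) (x : List (String × String))
    (rest : List (List (String × String))) :
    pvLastLabel t (x :: rest) =
      (if (PySem.Dict.ofList x).get? "type" = some t then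
        match (PySem.Dict.ofList x).get? "label" with
        | some label => if label ≠ "" then label else pvLastLabel t rest
        | none => pvLastLabel t rest
      else pvLastLabel t rest) := rfl

-- A's foldl, written as a foldr over the reversed list, equals B's three backward searches.
theorem pvFoldr_eq_lasts (r : List (List (String × String))) :
    r.foldr (fun x st => pvStepA st x) ("Not Specified", "Not Specified", "Not Specified")
      = (pvLastLabel "experience" r, pvLastLabel "salary" r, pvLastLabel "location" r) := by
  induction r with
  | nil => rfl
  | cons x xs ih =>
    simp only [List.foldr_cons, ih, pvLastLabel_cons]
    unfold pvStepA
    rcases hl : (PySem.Dict.ofList x).get? "label" with _ | label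
    · simp [hl]
    · simp only [hl]
      by_cases he : label = ""
      · simp [he]
      · simp only [he, ne_eq, not_false_eq_true, if_true]
        rcases ht : (PySem.Dict.ofList x).get? "type" with _ | t
        · simp [ht]
        · by_cases h1 : t = "experience"
          · simp [ht, h1]
          · by_cases h2 : t = "salary"
            · simp [ht, h2]
            · by_cases h3 : t = "location"
              · simp [ht, h3]
              · simp [ht, h1, h2, h3]

-- ===== VERDICT (by name: the statement is the Claim_ definition above) =====
theorem extract_placeholder_info_spec : Claim_equal_extract_placeholder_info := by
  intro placeholders _
  unfold Spec_extract_placeholder_info extract_placeholder_info extract_placeholder_info_alt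
  rw [← pvFoldr_eq_lasts placeholders.reverse, List.foldr_reverse]
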